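-- pv_equiv track=rewrite | github.com/yet-another-tool/learning-python | text_to_dna_to_text.py | dna2ascii
-- ===== SOURCE A (Python) =====
-- def dna2ascii(dna):
--     text = ""
--     num = []
--     for b in [*dna]:
--         if(b == 'T'):
--             num.append(0)
--         if(b == 'A'):
--             num.append(1)
--         if(b == 'C'):
--             num.append(2)
--         if(b == 'G'):
--             num.append(3)
--
--     for chunk in [num[i:i+4] for i in range(0, len(num), 4)]:
--         s = sum([(l*(4**(len(chunk)-index-1)))
--                  for index, l in enumerate(chunk)])
--         text += chr(s)
--     return text
-- ===== SOURCE B (Python) =====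
-- def dna2ascii(dna):
--     digit = {'T': 0, 'A': 1, 'C': 2, 'G': 3}
--     out = []
--     acc = 0
--     cnt = 0
--     for ch in dna:
--         d = digit.get(ch)
--         if d is None:
--             continue
--         acc = acc * 4 + d
--         cnt += 1
--         if cnt == 4:
--             out.append(chr(acc))
--             acc = 0
--             cnt = 0
--     if cnt:
--         out.append(chr(acc))
--     return "".join(out)
-- ===== Notes on version B (the rewrite author's own statement) =====
-- stated objective: alternative
-- what changed: Replaced A's two passes (build a digit list, then a range/slice chunk comprehension whose per-chunk value is a sum of descending powers of 4 via enumerate) by a single pass over the string with a Horner accumulator and a group counter, flushing a character every 4 digits and once more for a trailing partial group; no intermediate list, no slicing, no exponentiation.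
import Mathlib
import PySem

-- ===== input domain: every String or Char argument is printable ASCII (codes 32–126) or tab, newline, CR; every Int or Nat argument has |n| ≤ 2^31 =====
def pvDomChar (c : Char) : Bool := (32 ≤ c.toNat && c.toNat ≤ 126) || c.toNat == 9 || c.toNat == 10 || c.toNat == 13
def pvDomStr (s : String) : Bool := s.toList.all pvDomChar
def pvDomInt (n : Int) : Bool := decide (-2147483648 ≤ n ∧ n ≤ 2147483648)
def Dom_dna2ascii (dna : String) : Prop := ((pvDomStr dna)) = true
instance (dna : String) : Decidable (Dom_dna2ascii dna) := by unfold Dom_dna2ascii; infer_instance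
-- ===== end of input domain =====

-- B replaces A's two-pass digit-list + chunk-comprehension decode by a single pass with a
-- Horner accumulator and group counter: no intermediate list, no slices, no pow.

-- ===== PORT A =====
-- the body of A's first loop (four independent ifs appending a digit)
def aStep (num : List Int) (b : Char) : List Int :=
  let num := if b == 'T' then num ++ [(0 : Int)] else num
  let num := if b == 'A' then num ++ [(1 : Int)] else num
  let num := if b == 'C' then num ++ [(2 : Int)] else num
  if b == 'G' then num ++ [(3 : Int)] else num

-- s = sum([(l*(4**(len(chunk)-index-1))) for index, l in enumerate(chunk)])
-- '.toNat' on the exponent is exact: index < len(chunk), so the exponent is nonnegative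
def valA (chunk : List Int) : Int :=
  ((PySem.List.enumerate chunk).map
    (fun p => p.2 * (4 : Int) ^ (((chunk.length : Int) - p.1 - 1).toNat))).sum

def dna2ascii (dna : String) : String :=
  let num := dna.toList.foldl aStep []
  -- chr(s): Char.ofNat s.toNat is exact here since 0 ≤ s < 256 for every chunk
  ((PySem.List.pyRange 0 (num.length : Int) 4).map
      (fun i => PySem.List.slice num (some i) (some (i + 4)))).foldl
    (fun text chunk => text.push (Char.ofNat (valA chunk).toNat)) ""

-- ===== PORT B =====
def bDigit : PySem.Dict Char Int := PySem.Dict.ofList [('T', 0), ('A', 1), ('C', 2), ('G', 3)]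

-- body of B's loop: skip non-digit characters, Horner-update acc, flush on cnt == 4
def bStep (st : List Char × Int × Int) (ch : Char) : List Char × Int × Int :=
  match PySem.Dict.get? bDigit ch with
  | none => st
  | some d =>
    let acc := st.2.1 * 4 + d
    let cnt := st.2.2 + 1
    if cnt == 4 then (st.1 ++ [Char.ofNat acc.toNat], 0, 0) else (st.1, acc, cnt)

def dna2ascii_alt (dna : String) : String :=
  let r := dna.toList.foldl bStep ([], 0, 0)
  if r.2.2 != 0 then String.ofList (r.1 ++ [Char.ofNat r.2.1.toNat]) else String.ofList r.1

-- ===== PRECONDITION & SPEC =====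
def Spec_dna2ascii (dna : String) (out : String) : Prop := out = dna2ascii_alt dna
instance (dna : String) (out : String) : Decidable (Spec_dna2ascii dna out) := by unfold Spec_dna2ascii; infer_instance

-- ===== CLAIM (what is proved, stated in full; the proofs are below) =====
def Claim_equal_dna2ascii : Prop := ∀ (dna : String), Dom_dna2ascii dna → Spec_dna2ascii dna (dna2ascii dna)

-- ===== LEMMAS AND PROOFS =====

def digitOf (c : Char) : Option Int :=
  if c = 'T' then some 0 else if c = 'A' then some 1
  else if c = 'C' then some 2 else if c = 'G' then some 3 else none

def bStep' (st : List Char × Int × Int) (d : Int) : List Char × Int × Int :=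
  let acc := st.2.1 * 4 + d
  let cnt := st.2.2 + 1
  if cnt == 4 then (st.1 ++ [Char.ofNat acc.toNat], 0, 0) else (st.1, acc, cnt)

def chrOf (chunk : List Int) : Char := Char.ofNat (valA chunk).toNat

def chunksRec : List Int → List (List Int)
  | [] => []
  | [a] => [[a]]
  | [a, b] => [[a, b]]
  | [a, b, c] => [[a, b, c]]
  | a :: b :: c :: d :: rest => [a, b, c, d] :: chunksRec rest

lemma chunksRec_cons (x : Int) (xs : List Int) :
    chunksRec (x :: xs) = ((x :: xs).take 4) :: chunksRec ((x :: xs).drop 4) := by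
  rcases xs with _ | ⟨b, _ | ⟨c, _ | ⟨d, rest⟩⟩⟩ <;> simp [chunksRec]

lemma bDigit_eq : bDigit = PySem.Dict.mk [('T', 0), ('A', 1), ('C', 2), ('G', 3)] := by
  decide

lemma dget (c : Char) : PySem.Dict.get? bDigit c = digitOf c := by
  rw [bDigit_eq]
  simp only [PySem.Dict.get?_mk_cons, digitOf, beq_iff_eq]
  by_cases h1 : c = 'T' <;> by_cases h2 : c = 'A' <;> by_cases h3 : c = 'C' <;>
    by_cases h4 : c = 'G' <;> simp_all [eq_comm, PySem.Dict.get?]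

lemma aStep_eq (num : List Int) (b : Char) : aStep num b = num ++ (digitOf b).toList := by
  simp only [aStep, digitOf, beq_iff_eq]
  by_cases h1 : b = 'T' <;> by_cases h2 : b = 'A' <;> by_cases h3 : b = 'C' <;>
    by_cases h4 : b = 'G' <;> simp_all

lemma phase1 (l : List Char) : ∀ init : List Int,
    l.foldl aStep init = init ++ l.filterMap digitOf := by
  induction l with
  | nil => simp
  | cons c l ih =>
    intro init
    simp only [List.foldl_cons, ih, aStep_eq, List.filterMap_cons]
    cases h : digitOf c <;> simp

lemma bStep_eq (st : List Char × Int × Int) (c : Char) :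
    bStep st c = match digitOf c with | none => st | some d => bStep' st d := by
  simp [bStep, bStep', dget]

lemma skip (l : List Char) : ∀ st,
    l.foldl bStep st = (l.filterMap digitOf).foldl bStep' st := by
  induction l with
  | nil => simp
  | cons c l ih =>
    intro st
    simp only [List.foldl_cons, bStep_eq]
    cases h : digitOf c <;> simp [h, ih]

lemma pyRange4_cons (n : Int) (h : 0 < n) :
    PySem.List.pyRange 0 n 4 = 0 :: PySem.List.pyRange 4 n 4 := by
  rw [PySem.List.pyRange_of_pos _ _ (by norm_num), PySem.List.pyRange_of_pos _ _ (by norm_num)]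
  have hc : (if (0:Int) < n then ((n - 0 + 4 - 1) / 4).toNat else 0)
      = (if (4:Int) < n then ((n - 4 + 4 - 1) / 4).toNat else 0) + 1 := by
    split_ifs <;> omega
  rw [hc, List.range_succ_eq_map]
  simp only [List.map_cons, List.map_map]
  refine congrArg₂ List.cons (by norm_num) ?_
  apply List.map_congr_left
  intro k _
  show (0 : Int) + 4 * ((k : Nat) + 1 : Nat) = 4 + 4 * (k : Nat)
  push_cast
  ring

lemma pyRange4_shift (n : Int) :
    PySem.List.pyRange 4 n 4 = (PySem.List.pyRange 0 (n - 4) 4).map (· + 4) := by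
  rw [PySem.List.pyRange_of_pos _ _ (by norm_num), PySem.List.pyRange_of_pos _ _ (by norm_num)]
  have hc : (if (4:Int) < n then ((n - 4 + 4 - 1) / 4).toNat else 0)
      = (if (0:Int) < n - 4 then ((n - 4 - 0 + 4 - 1) / 4).toNat else 0) := by
    split_ifs <;> omega
  rw [hc, List.map_map]
  apply List.map_congr_left
  intro k _
  simp [Function.comp]
  ring

lemma mem_pyRange4_nonneg {i n : Int} (h : i ∈ PySem.List.pyRange 0 n 4) : 0 ≤ i := by
  rw [PySem.List.pyRange_of_pos _ _ (by norm_num)] at h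
  obtain ⟨k, _, rfl⟩ := List.mem_map.mp h
  positivity

lemma chunks_eq_aux : ∀ (n : Nat) (xs : List Int), xs.length ≤ n →
    (PySem.List.pyRange 0 (xs.length : Int) 4).map
      (fun i => PySem.List.slice xs (some i) (some (i + 4))) = chunksRec xs := by
  intro n
  induction n with
  | zero =>
    intro xs hxs
    obtain rfl : xs = [] := List.eq_nil_of_length_eq_zero (Nat.le_zero.mp hxs)
    rw [PySem.List.pyRange_of_pos _ _ (by norm_num)]
    simp [chunksRec]
  | succ n ih =>
    intro xs hxs
    cases xs with
    | nil =>
      rw [PySem.List.pyRange_of_pos _ _ (by norm_num)]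
      simp [chunksRec]
    | cons x xs =>
      rw [pyRange4_cons _ (by simp), pyRange4_shift]
      rw [List.map_cons, List.map_map]
      have hfirst : PySem.List.slice (x :: xs) (some 0) (some (0 + 4)) = (x :: xs).take 4 := by
        simp only [PySem.List.slice_zero_start]
        norm_num
        rw [PySem.List.slice_to _ (by norm_num)]
        rfl
      have hrest : ((PySem.List.pyRange 0 (((x :: xs).length : Int) - 4) 4).map
            ((fun i => PySem.List.slice (x :: xs) (some i) (some (i + 4))) ∘ (· + 4)))
          = (PySem.List.pyRange 0 (((x :: xs).drop 4).length : Int) 4).map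
            (fun i => PySem.List.slice ((x :: xs).drop 4) (some i) (some (i + 4))) := by
        by_cases hle : (x :: xs).length ≤ 4
        · have h1 : PySem.List.pyRange 0 (((x :: xs).length : Int) - 4) 4 = [] := by
            rw [PySem.List.pyRange_of_pos _ _ (by norm_num)]
            rw [if_neg (by omega)]
            simp
          have h2 : PySem.List.pyRange 0 ((((x :: xs).drop 4).length : Int)) 4 = [] := by
            rw [PySem.List.pyRange_of_pos _ _ (by norm_num)]
            rw [if_neg (by simp only [List.length_drop]; omega)]
            simp
          rw [h1, h2]
          simp
        · have hlen' : ((((x :: xs).drop 4).length : Int)) = ((x :: xs).length : Int) - 4 := by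
            simp only [List.length_drop]
            omega
          rw [hlen']
          apply List.map_congr_left
          intro i hi
          have hi0 : 0 ≤ i := mem_pyRange4_nonneg hi
          simp only [Function.comp]
          rw [PySem.List.slice_toNat _ (by omega) (by omega),
              PySem.List.slice_toNat _ (by omega) (by omega)]
          rw [List.drop_drop]
          congr 1
          · omega
          · congr 1
            omega
      rw [hrest, ih ((x :: xs).drop 4) (by simp only [List.length_drop]; omega), hfirst]
      rw [chunksRec_cons]

lemma chunks_eq (xs : List Int) :
    (PySem.List.pyRange 0 (xs.length : Int) 4).map
      (fun i => PySem.List.slice xs (some i) (some (i + 4))) = chunksRec xs :=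
  chunks_eq_aux xs.length xs le_rfl

lemma foldl_push (chunks : List (List Int)) : ∀ t : String,
    chunks.foldl (fun t c => t.push (Char.ofNat (valA c).toNat)) t
      = String.ofList (t.toList ++ chunks.map chrOf) := by
  induction chunks with
  | nil =>
    intro t
    simp [String.ofList_toList]
  | cons c cs ih =>
    intro t
    simp only [List.foldl_cons, List.map_cons, ih, chrOf, String.toList_push]
    simp

lemma valA_one (a : Int) : valA [a] = a := by
  simp [valA, PySem.List.enumerate]

lemma valA_two (a b : Int) : valA [a, b] = a * 4 + b := by
  simp [valA, PySem.List.enumerate]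

lemma valA_three (a b c : Int) : valA [a, b, c] = (a * 4 + b) * 4 + c := by
  simp [valA, PySem.List.enumerate]
  ring

lemma valA_four (a b c d : Int) : valA [a, b, c, d] = ((a * 4 + b) * 4 + c) * 4 + d := by
  simp [valA, PySem.List.enumerate]
  ring

lemma B_main_aux : ∀ (n : Nat) (num : List Int), num.length ≤ n → ∀ out : List Char,
    (let r := num.foldl bStep' (out, 0, 0)
     if r.2.2 != 0 then r.1 ++ [Char.ofNat r.2.1.toNat] else r.1)
      = out ++ (chunksRec num).map chrOf := by
  intro n
  induction n with
  | zero =>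
    intro num hnum out
    obtain rfl : num = [] := List.eq_nil_of_length_eq_zero (Nat.le_zero.mp hnum)
    simp [chunksRec]
  | succ n ih =>
    intro num hnum out
    rcases num with _ | ⟨a, _ | ⟨b, _ | ⟨c, _ | ⟨d, rest⟩⟩⟩⟩
    · simp [chunksRec]
    · simp [chunksRec, bStep', chrOf, valA_one]
    · simp [chunksRec, bStep', chrOf, valA_two]
    · simp [chunksRec, bStep', chrOf, valA_three]
    · have hfold : (a :: b :: c :: d :: rest).foldl bStep' (out, 0, 0)
          = rest.foldl bStep' (out ++ [Char.ofNat (((a * 4 + b) * 4 + c) * 4 + d).toNat], 0, 0) := by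
        simp [bStep']
      simp only [hfold]
      have h := ih rest (by simp at hnum ⊢; omega)
        (out ++ [Char.ofNat (((a * 4 + b) * 4 + c) * 4 + d).toNat])
      simp only at h
      rw [h]
      rw [show chunksRec (a :: b :: c :: d :: rest) = [a, b, c, d] :: chunksRec rest from rfl]
      simp [chrOf, valA_four]

-- ===== VERDICT (by name: the statement is the Claim_ definition above) =====
theorem dna2ascii_spec : Claim_equal_dna2ascii := by
  intro dna _
  unfold Spec_dna2ascii dna2ascii dna2ascii_alt
  simp only
  rw [phase1, skip, chunks_eq, foldl_push]
  have h := B_main_aux (dna.toList.filterMap digitOf).length (dna.toList.filterMap digitOf)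
    le_rfl []
  simp only at h
  rw [← apply_ite String.ofList, h]
  simp
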